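-- pv_equiv track=rewrite | github.com/liuhanning/RoundTable | roundtable/utils/logger.py | redact_api_key
-- ===== SOURCE A (Python) =====
-- from typing import Any, Dict, List, Optional
--
-- def redact_api_key(headers: Dict[str, str]) -> Dict[str, str]:
--     """
--     脱敏 HTTP 请求头中的 API Key
--
--     Args:
--         headers: HTTP 请求头字典
--
--     Returns:
--         脱敏后的请求头
--     """
--     redacted = headers.copy()
--
--     sensitive_headers = [
--         'authorization',
--         'x-api-key',
--         'api-key',
--         'x-auth-token',
--         'cookie',
--     ]
--
--     for header in sensitive_headers:
--         if header in redacted: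
--             redacted[header] = '[REDACTED]'
--
--     return redacted
-- ===== SOURCE B (Python) =====
-- def _is_sensitive(k):
--     return (k == 'authorization' or k == 'x-api-key' or k == 'api-key'
--             or k == 'x-auth-token' or k == 'cookie')
--
--
-- def redact_api_key(headers):
--     out = []
--     for k, v in headers.items():
--         out.append((k, '[REDACTED]' if _is_sensitive(k) else v))
--     return dict(out)
-- ===== Notes on version B (the rewrite author's own statement) =====
-- stated objective: alternative
-- what changed: B recursively rebuilds the header list item by item, deciding each value with an explicit equality chain against the five sensitive names, instead of copying the dict and mutating the copy in a loop over the fixed name list.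
import Mathlib
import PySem

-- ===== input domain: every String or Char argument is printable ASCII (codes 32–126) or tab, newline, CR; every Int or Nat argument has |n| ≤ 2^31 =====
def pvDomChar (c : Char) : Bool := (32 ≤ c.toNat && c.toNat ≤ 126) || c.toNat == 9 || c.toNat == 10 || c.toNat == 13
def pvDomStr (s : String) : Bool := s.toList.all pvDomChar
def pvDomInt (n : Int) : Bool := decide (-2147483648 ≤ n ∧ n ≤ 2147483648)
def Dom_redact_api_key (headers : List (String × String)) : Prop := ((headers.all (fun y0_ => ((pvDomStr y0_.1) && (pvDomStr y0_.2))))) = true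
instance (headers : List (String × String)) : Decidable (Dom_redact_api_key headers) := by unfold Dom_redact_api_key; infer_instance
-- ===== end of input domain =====

-- B rebuilds the header items in one accumulating pass, deciding each value by an equality chain
-- against the five sensitive names, instead of A's copy-then-mutate loop over the fixed
-- name list (alternative decomposition; same cost).

-- ===== PORT A =====
def sensitiveHeadersA : List String :=
  ["authorization", "x-api-key", "api-key", "x-auth-token", "cookie"]

def redact_api_key (headers : List (String × String)) : List (String × String) :=
  let redacted := PySem.Dict.ofList headers
  (sensitiveHeadersA.foldl
    (fun r h => if r.contains h then r.insert h "[REDACTED]" else r) redacted).items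

-- ===== PORT B =====
def pvIsSensitive (k : String) : Bool :=
  k == "authorization" || k == "x-api-key" || k == "api-key" ||
  k == "x-auth-token" || k == "cookie"

def redact_api_key_alt (headers : List (String × String)) : List (String × String) :=
  let out := (PySem.Dict.ofList headers).items.foldl
    (fun out p => out ++ [(p.1, if pvIsSensitive p.1 then "[REDACTED]" else p.2)]) []
  (PySem.Dict.ofList out).items

-- ===== PRECONDITION & SPEC =====
def Spec_redact_api_key (headers : List (String × String)) (out : List (String × String)) : Prop := out = redact_api_key_alt headers
instance (headers : List (String × String)) (out : List (String × String)) : Decidable (Spec_redact_api_key headers out) := by unfold Spec_redact_api_key; infer_instance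

-- ===== CLAIM =====
def Claim_equal_redact_api_key : Prop := ∀ (headers : List (String × String)), Dom_redact_api_key headers → Spec_redact_api_key headers (redact_api_key headers)

-- ===== LEMMAS AND PROOFS =====

-- one step of A's loop rewrites the items pointwise
theorem step_items (d : PySem.Dict String String) (h : String) :
    (if d.contains h then d.insert h "[REDACTED]" else d).items
      = d.items.map (fun p => if p.1 == h then (h, "[REDACTED]") else p) := by
  by_cases hc : d.contains h = true
  · rw [if_pos hc, PySem.Dict.items_insert_of_contains d "[REDACTED]" hc]
  · rw [if_neg hc]
    symm
    rw [List.map_congr_left (g := id), List.map_id]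
    intro p hp
    have hk : p.1 ∈ d.keys := PySem.Dict.mem_keys_of_mem_items d hp
    have hne : p.1 ≠ h := by
      intro e; subst e
      exact hc ((PySem.Dict.contains_iff_mem_keys d p.1).mpr hk)
    simp [hne]

theorem fold_items (S : List String) (d : PySem.Dict String String) :
    (S.foldl (fun r h => if r.contains h then r.insert h "[REDACTED]" else r) d).items
      = d.items.map (fun p => if S.contains p.1 then (p.1, "[REDACTED]") else p) := by
  induction S generalizing d with
  | nil => simp
  | cons h S ih =>
    simp only [List.foldl_cons]
    rw [ih, step_items, List.map_map]
    apply List.map_congr_left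
    intro p _
    by_cases he : p.1 = h
    · subst he
      by_cases hs : S.contains p.1 = true <;> simp
    · have : (p.1 == h) = false := by simp [he]
      simp [Function.comp, this, he]

-- B's accumulating loop is a pointwise map
theorem redactLoop_eq_map (l : List (String × String)) (acc : List (String × String)) :
    l.foldl (fun out p => out ++ [(p.1, if pvIsSensitive p.1 then "[REDACTED]" else p.2)]) acc
      = acc ++ l.map (fun p => (p.1, if pvIsSensitive p.1 then "[REDACTED]" else p.2)) := by
  induction l generalizing acc with
  | nil => simp
  | cons p rest ih => simp [ih]

-- the equality chain agrees with membership in A's fixed list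
theorem isSensitive_eq_contains (k : String) :
    pvIsSensitive k = sensitiveHeadersA.contains k := by
  simp [pvIsSensitive, sensitiveHeadersA, Bool.or_assoc, beq_eq_decide]

-- dict() of a list whose keys are distinct returns the list itself
theorem ofList_items_of_nodup (l : List (String × String))
    (h : (l.map Prod.fst).Nodup) : (PySem.Dict.ofList l).items = l := by
  have := PySem.Dict.items_foldl_insert_fresh (l := l) (k := Prod.fst) (v := Prod.snd)
      (d := PySem.Dict.empty) (by intro a _; simp) h
  simpa using this

theorem redact_api_key_spec_aux (headers : List (String × String)) :
    redact_api_key headers = redact_api_key_alt headers := by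
  have hk : ((PySem.Dict.ofList headers).items.map Prod.fst).Nodup := by
    have h := PySem.Dict.nodup_keys_ofList (ps := headers)
    simpa [PySem.Dict.keys] using h
  have h2 := ofList_items_of_nodup
    ((PySem.Dict.ofList headers).items.map
      (fun p => (p.1, if pvIsSensitive p.1 then "[REDACTED]" else p.2)))
    (by rw [List.map_map]; exact hk)
  unfold redact_api_key redact_api_key_alt
  simp only [redactLoop_eq_map, List.nil_append]
  rw [fold_items, h2]
  apply List.map_congr_left
  intro p _
  rw [← isSensitive_eq_contains]
  by_cases hs : pvIsSensitive p.1 = true <;> simp [hs]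

-- ===== VERDICT =====
theorem redact_api_key_spec : Claim_equal_redact_api_key := by
  intro headers _
  exact redact_api_key_spec_aux headers
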